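-- pv_equiv track=rewrite | github.com/cintnguyen/Code-Wars | Python/8kyu/diff_in_age.py | difference_in_ages
-- ===== SOURCE A (Python) =====
-- def difference_in_ages(ages):
--     youngest = ages[0]
--     oldest = ages[0]
--     for age in ages:
--         if age < youngest:
--             youngest = age
--         elif age > oldest:
--             oldest = age
--     diff = oldest - youngest
--     return youngest, oldest, diff
-- ===== SOURCE B (Python) =====
-- def difference_in_ages(ages):
--     s = sorted(ages)
--     youngest = s[0]
--     oldest = s[-1]
--     return youngest, oldest, oldest - youngest
-- ===== Notes on version B (the rewrite author's own statement) =====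
-- stated objective: simpler
-- what changed: Replaces the manual min/max tracking loop with sorting the list once and reading the youngest and oldest off the two ends of the sorted copy.
import Mathlib
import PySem

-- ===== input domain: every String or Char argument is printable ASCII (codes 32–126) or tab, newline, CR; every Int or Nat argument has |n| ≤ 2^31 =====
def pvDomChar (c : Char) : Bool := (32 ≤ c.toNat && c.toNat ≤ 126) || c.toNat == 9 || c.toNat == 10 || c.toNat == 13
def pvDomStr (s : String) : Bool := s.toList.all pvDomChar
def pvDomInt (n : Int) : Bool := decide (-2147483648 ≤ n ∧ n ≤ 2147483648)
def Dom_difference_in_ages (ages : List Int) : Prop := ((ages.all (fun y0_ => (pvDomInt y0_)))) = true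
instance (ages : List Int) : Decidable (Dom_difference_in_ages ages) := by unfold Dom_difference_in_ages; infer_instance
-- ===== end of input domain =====

-- B replaces A's single min/max-tracking pass by sorting a copy and reading both ends (objective: simpler).

-- ===== PORT A =====
-- youngest = oldest = ages[0]; one pass updating youngest/oldest; return (youngest, oldest, oldest - youngest).
-- ages[0] is total here only under Pre_ (nonempty list), matching Python's IndexError on [].
def difference_in_ages (ages : List Int) : Int × Int × Int :=
  let youngest0 := PySem.List.pyGetD ages 0 0
  let oldest0 := PySem.List.pyGetD ages 0 0
  let p := ages.foldl
    (fun (st : Int × Int) age =>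
      if age < st.1 then (age, st.2)
      else if age > st.2 then (st.1, age)
      else st)
    (youngest0, oldest0)
  (p.1, p.2, p.2 - p.1)

-- ===== PORT B =====
-- s = sorted(ages); youngest = s[0]; oldest = s[-1]; return (youngest, oldest, oldest - youngest)
def difference_in_ages_alt (ages : List Int) : Int × Int × Int :=
  let s := PySem.List.sorted ages (fun x => x) false
  let youngest := PySem.List.pyGetD s 0 0
  let oldest := PySem.List.pyGetD s (-1) 0
  (youngest, oldest, oldest - youngest)

-- ===== PRECONDITION & SPEC =====
-- A raises IndexError on the empty list (ages[0]); B raises there too (s[0]).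
def Pre_difference_in_ages (ages : List Int) : Prop := ages ≠ []
instance (ages : List Int) : Decidable (Pre_difference_in_ages ages) := by unfold Pre_difference_in_ages; infer_instance
def pvWitness_difference_in_ages : List Int := [30, 4, 18]

def Spec_difference_in_ages (ages : List Int) (out : Int × Int × Int) : Prop := out = difference_in_ages_alt ages
instance (ages : List Int) (out : Int × Int × Int) : Decidable (Spec_difference_in_ages ages out) := by unfold Spec_difference_in_ages; infer_instance

-- ===== CLAIM (what is proved, stated in full; the proofs are below) =====
def Claim_equal_difference_in_ages : Prop := ∀ (ages : List Int), Dom_difference_in_ages ages → Pre_difference_in_ages ages → Spec_difference_in_ages ages (difference_in_ages ages)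

-- ===== LEMMAS AND PROOFS =====

-- A's fold step, named for the lemmas below.
def pvStep (st : Int × Int) (age : Int) : Int × Int :=
  if age < st.1 then (age, st.2)
  else if age > st.2 then (st.1, age)
  else st

lemma pvStep_eq_minmax (y o age : Int) (h : y ≤ o) :
    pvStep (y, o) age = (min y age, max o age) := by
  unfold pvStep
  simp only []
  split_ifs with h1 h2 <;> simp <;> omega

lemma foldl_pvStep_minmax (t : List Int) :
    ∀ y o : Int, y ≤ o →
      t.foldl pvStep (y, o) = (t.foldl min y, t.foldl max o) := by
  induction t with
  | nil => intro y o _; simp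
  | cons a t ih =>
    intro y o h
    simp only [List.foldl_cons]
    rw [pvStep_eq_minmax y o a h]
    exact ih _ _ (le_trans (min_le_left y a) (le_trans h (le_max_left o a)))

lemma foldl_min_mem (t : List Int) : ∀ a : Int, t.foldl min a ∈ a :: t := by
  induction t with
  | nil => intro a; simp
  | cons b t ih =>
    intro a
    simp only [List.foldl_cons]
    rcases List.mem_cons.mp (ih (min a b)) with he | h
    · rcases le_total a b with hab | hab
      · rw [he, min_eq_left hab]; simp
      · rw [he, min_eq_right hab]; simp
    · simp [h]

lemma foldl_min_le (t : List Int) : ∀ a : Int, ∀ x ∈ a :: t, t.foldl min a ≤ x := by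
  induction t with
  | nil =>
    intro a x hx
    simp only [List.mem_singleton] at hx
    subst hx; simp
  | cons b t ih =>
    intro a x hx
    simp only [List.foldl_cons]
    rcases List.mem_cons.mp hx with rfl | hx2
    · exact le_trans (ih (min x b) _ (List.mem_cons_self)) (min_le_left x b)
    · rcases List.mem_cons.mp hx2 with rfl | hx3
      · exact le_trans (ih (min a x) _ (List.mem_cons_self)) (min_le_right a x)
      · exact ih (min a b) x (List.mem_cons_of_mem _ hx3)

lemma foldl_max_mem (t : List Int) : ∀ a : Int, t.foldl max a ∈ a :: t := by
  induction t with
  | nil => intro a; simp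
  | cons b t ih =>
    intro a
    simp only [List.foldl_cons]
    rcases List.mem_cons.mp (ih (max a b)) with he | h
    · rcases le_total a b with hab | hab
      · rw [he, max_eq_right hab]; simp
      · rw [he, max_eq_left hab]; simp
    · simp [h]

lemma foldl_max_ge (t : List Int) : ∀ a : Int, ∀ x ∈ a :: t, x ≤ t.foldl max a := by
  induction t with
  | nil =>
    intro a x hx
    simp only [List.mem_singleton] at hx
    subst hx; simp
  | cons b t ih =>
    intro a x hx
    simp only [List.foldl_cons]
    rcases List.mem_cons.mp hx with rfl | hx2
    · exact le_trans (le_max_left x b) (ih (max x b) _ (List.mem_cons_self))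
    · rcases List.mem_cons.mp hx2 with rfl | hx3
      · exact le_trans (le_max_right a x) (ih (max a x) _ (List.mem_cons_self))
      · exact ih (max a b) x (List.mem_cons_of_mem _ hx3)

-- Pairwise (≤) head is ≤ everything in the list.
lemma pairwise_head_le (h : Int) (rest : List Int) (hp : (h :: rest).Pairwise (· ≤ ·)) :
    ∀ x ∈ h :: rest, h ≤ x := by
  intro x hx
  rcases List.mem_cons.mp hx with rfl | hx2
  · exact le_refl x
  · exact (List.pairwise_cons.mp hp).1 x hx2

-- Pairwise (≤) last is ≥ everything in the list.
lemma pairwise_le_getLast (s : List Int) (hs : s ≠ []) (hp : s.Pairwise (· ≤ ·)) :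
    ∀ x ∈ s, x ≤ s.getLast hs := by
  intro x hx
  rcases List.eq_nil_or_concat s with rfl | ⟨ys, y, rfl⟩
  · exact absurd rfl hs
  · simp only [List.concat_eq_append] at *
    rw [List.getLast_append_singleton]
    rcases List.mem_append.mp hx with h | h
    · exact (List.pairwise_append.mp hp).2.2 x h y (by simp)
    · simp at h; omega

-- ===== VERDICT (by name: the statement is the Claim_ definition above) =====
theorem difference_in_ages_spec : Claim_equal_difference_in_ages := by
  intro ages _ hpre
  unfold Spec_difference_in_ages difference_in_ages difference_in_ages_alt
  obtain ⟨a, t, rfl⟩ : ∃ a t, ages = a :: t := by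
    cases ages with
    | nil => exact absurd rfl hpre
    | cons a t => exact ⟨a, t, rfl⟩
  -- A's side: fold computes (min, max)
  have hA : (a :: t).foldl (fun (st : Int × Int) age =>
      if age < st.1 then (age, st.2)
      else if age > st.2 then (st.1, age)
      else st) (PySem.List.pyGetD (a :: t) 0 0, PySem.List.pyGetD (a :: t) 0 0)
      = (t.foldl min a, t.foldl max a) := by
    have hstep : (fun (st : Int × Int) age =>
        if age < st.1 then (age, st.2)
        else if age > st.2 then (st.1, age)
        else st) = pvStep := rfl
    rw [hstep, PySem.List.pyGetD_zero_cons]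
    simp only [List.foldl_cons]
    rw [pvStep_eq_minmax a a a le_rfl]
    simp only [min_self, max_self]
    exact foldl_pvStep_minmax t a a le_rfl
  -- B's side: sorted list
  set s := PySem.List.sorted (a :: t) (fun x => x) false with hsdef
  have hperm : s.Perm (a :: t) := PySem.List.sorted_perm _ _ _
  have hsne : s ≠ [] := by
    intro h; have := hperm.length_eq; simp [h] at this
  have hpw : s.Pairwise (· ≤ ·) := by
    have := PySem.List.sorted_pairwise (xs := a :: t) (key := fun x => x)
    simpa using this
  obtain ⟨h0, rest, hs⟩ : ∃ h0 rest, s = h0 :: rest := by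
    cases hse : s with
    | nil => exact absurd hse hsne
    | cons h0 rest => exact ⟨h0, rest, rfl⟩
  have hmemS : ∀ x, x ∈ s ↔ x ∈ a :: t := fun x => hperm.mem_iff
  -- head of s equals foldl min
  have hmin : PySem.List.pyGetD s 0 0 = t.foldl min a := by
    rw [hs, PySem.List.pyGetD_zero_cons]
    have h1 : h0 ≤ t.foldl min a := by
      apply pairwise_head_le h0 rest (hs ▸ hpw)
      rw [← hs, hmemS]
      exact foldl_min_mem t a
    have h2 : t.foldl min a ≤ h0 := by
      apply foldl_min_le t a
      rw [← hmemS, hs]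
      simp
    omega
  -- last of s equals foldl max
  have hmax : PySem.List.pyGetD s (-1) 0 = t.foldl max a := by
    rw [PySem.List.pyGetD_neg_one s 0 hsne]
    have h1 : s.getLast hsne ≤ t.foldl max a := by
      apply foldl_max_ge t a
      rw [← hmemS]
      exact List.getLast_mem hsne
    have h2 : t.foldl max a ≤ s.getLast hsne := by
      apply pairwise_le_getLast s hsne hpw
      rw [hmemS]
      exact foldl_max_mem t a
    omega
  simp only [hA, hmin, hmax]
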